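-- pv_equiv track=rewrite | github.com/juSt6790/Agentic-Chatbot | agent_backend/services/notion_mcp.py | find_status_property_name
-- ===== SOURCE A (Python) =====
-- from typing import List, Dict, Any, Optional
--
-- def find_status_property_name(properties: Dict[str, Any]) -> str | None:
--     """
--     Find the most appropriate status property in a database schema.
--     Prefer properties whose type is 'status', otherwise fall back to a
--     property literally named 'Status' (case-insensitive).
--     """
--     for prop_name, prop_info in properties.items():
--         if prop_info.get("type") == "status":
--             return prop_name
--     for prop_name in properties.keys():
--         if prop_name.lower() == "status":
--             return prop_name
--     return None
-- ===== SOURCE B (Python) =====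
-- def find_status_property_name(properties):
--     """Single pass: return on a type-'status' property immediately; remember
--     the first name-'status' property as a fallback, returned after the loop."""
--     fallback = None
--     for prop_name, prop_info in properties.items():
--         if prop_info.get("type") == "status":
--             return prop_name
--         if fallback is None and prop_name.lower() == "status":
--             fallback = prop_name
--     return fallback
-- ===== Notes on version B (the rewrite author's own statement) =====
-- stated objective: alternative
-- what changed: Replaced A's two full passes over the dict (type match pass, then name match pass) by a single pass that returns a type-'status' property immediately and carries the first name-'status' key as a fallback accumulator returned after the loop.
import Mathlib
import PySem

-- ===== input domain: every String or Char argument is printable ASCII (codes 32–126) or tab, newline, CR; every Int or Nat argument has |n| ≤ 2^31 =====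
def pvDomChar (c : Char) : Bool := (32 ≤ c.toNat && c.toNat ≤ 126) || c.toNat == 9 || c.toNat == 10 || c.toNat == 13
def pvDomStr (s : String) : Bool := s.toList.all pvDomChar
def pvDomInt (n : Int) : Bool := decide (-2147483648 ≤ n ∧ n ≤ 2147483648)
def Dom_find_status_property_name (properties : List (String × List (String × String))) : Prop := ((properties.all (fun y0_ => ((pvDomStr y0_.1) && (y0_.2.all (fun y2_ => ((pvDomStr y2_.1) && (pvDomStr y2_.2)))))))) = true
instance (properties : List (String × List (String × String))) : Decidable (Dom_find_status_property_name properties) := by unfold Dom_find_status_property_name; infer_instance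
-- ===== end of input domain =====

-- B replaces A's two passes over the dict by one pass with a fallback accumulator (alternative decomposition, same cost).


-- dict.get("type") on the association list (first match; exact for Python dicts, whose keys are unique)
def pyDictGet (info : List (String × String)) (k : String) : Option String :=
  match info.find? (fun kv => kv.1 == k) with
  | some kv => some kv.2
  | none => none

-- ===== PORT A =====
-- first loop of A: return the first property whose "type" is "status"
def fspnPass1 : List (String × List (String × String)) → Option String
  | [] => none
  | (n, info) :: rest =>
    if pyDictGet info "type" = some "status" then some n else fspnPass1 rest

-- second loop of A: return the first property literally named "status" (case-insensitive)
def fspnPass2 : List (String × List (String × String)) → Option String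
  | [] => none
  | (n, _) :: rest =>
    if PySem.Str.lower n = "status" then some n else fspnPass2 rest

def find_status_property_name (properties : List (String × List (String × String))) : Option String :=
  match fspnPass1 properties with
  | some n => some n
  | none =>
    match fspnPass2 properties with
    | some n => some n
    | none => none

-- ===== PORT B =====
-- B's single loop, carrying the fallback accumulator
def fspnLoop : List (String × List (String × String)) → Option String → Option String
  | [], fb => fb
  | (n, info) :: rest, fb =>
    if pyDictGet info "type" = some "status" then some n
    else fspnLoop rest (if fb = none ∧ PySem.Str.lower n = "status" then some n else fb)

def find_status_property_name_alt (properties : List (String × List (String × String))) : Option String :=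
  fspnLoop properties none

-- ===== PRECONDITION & SPEC =====
def Spec_find_status_property_name (properties : List (String × List (String × String))) (out : Option String) : Prop := out = find_status_property_name_alt properties
instance (properties : List (String × List (String × String))) (out : Option String) : Decidable (Spec_find_status_property_name properties out) := by unfold Spec_find_status_property_name; infer_instance

-- ===== CLAIM (what is proved, stated in full; the proofs are below) =====
def Claim_equal_find_status_property_name : Prop := ∀ (properties : List (String × List (String × String))), Dom_find_status_property_name properties → Spec_find_status_property_name properties (find_status_property_name properties)

-- ===== LEMMAS AND PROOFS =====
-- Invariant of B's loop: it equals pass1, else the carried fallback, else pass2.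
theorem fspnLoop_eq (ps : List (String × List (String × String))) (fb : Option String) :
    fspnLoop ps fb = ((fspnPass1 ps).or (fb.or (fspnPass2 ps))) := by
  induction ps generalizing fb with
  | nil => cases fb <;> simp [fspnLoop, fspnPass1, fspnPass2]
  | cons p rest ih =>
    obtain ⟨n, info⟩ := p
    by_cases ht : pyDictGet info "type" = some "status"
    · simp [fspnLoop, fspnPass1, ht]
    · by_cases hn : PySem.Str.lower n = "status"
      · cases fb <;> simp [fspnLoop, fspnPass1, fspnPass2, ht, hn, ih]
      · cases fb <;> simp [fspnLoop, fspnPass1, fspnPass2, ht, hn, ih]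

-- ===== VERDICT (by name: the statement is the Claim_ definition above) =====
theorem find_status_property_name_spec : Claim_equal_find_status_property_name := by
  intro ps _
  unfold Spec_find_status_property_name find_status_property_name find_status_property_name_alt
  rw [fspnLoop_eq]
  cases h1 : fspnPass1 ps <;> cases h2 : fspnPass2 ps <;> simp
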